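-- pv_equiv track=rewrite | github.com/yuvalg86/china | tonumbered.py | get_tabs_from_line
-- ===== SOURCE A (Python) =====
-- def get_tabs_from_line(line):
--     """
--     function that gets only tabs from a single line of the text.
--     :param line: the needed line to process.
--     """
--     tabs = ''
--     for word in line:
--         if word == '\t':
--             tabs += '\t'
--         else:
--             break
--     return tabs
-- ===== SOURCE B (Python) =====
-- def get_tabs_from_line(line):
--     """
--     function that gets only tabs from a single line of the text.
--     :param line: the needed line to process.
--     """
--     n = len(line) - len(line.lstrip('\t'))
--     return '\t' * n
-- ===== Notes on version B (the rewrite author's own statement) =====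
-- stated objective: idiomatic
-- what changed: Replaces the per-character accumulate-and-break loop with a closed form: the tab-prefix length is len(line) - len(line.lstrip('\t')) and the result is '\t' * n.
import Mathlib
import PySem

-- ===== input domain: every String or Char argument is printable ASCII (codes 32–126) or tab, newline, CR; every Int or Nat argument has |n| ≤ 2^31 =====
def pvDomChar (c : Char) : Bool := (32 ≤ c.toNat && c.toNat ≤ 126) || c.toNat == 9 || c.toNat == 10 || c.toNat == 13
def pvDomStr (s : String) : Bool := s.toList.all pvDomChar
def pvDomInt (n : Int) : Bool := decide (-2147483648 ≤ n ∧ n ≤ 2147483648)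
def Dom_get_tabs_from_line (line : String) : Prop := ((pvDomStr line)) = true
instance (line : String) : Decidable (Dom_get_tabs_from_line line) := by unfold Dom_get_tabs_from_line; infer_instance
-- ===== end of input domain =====

-- B computes the tab prefix in closed form ('\t' * (len - len(lstrip('\t')))) instead of A's
-- character-by-character accumulate-and-break loop; objective: idiomatic.

-- ===== PORT A =====
-- A's for-loop with break, accumulating `tabs`
def getTabsLoop : List Char → String → String
  | [], tabs => tabs
  | c :: rest, tabs => if c == '\t' then getTabsLoop rest (tabs ++ "\t") else tabs

def get_tabs_from_line (line : String) : String :=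
  getTabsLoop line.toList ""

-- ===== PORT B =====
def get_tabs_from_line_alt (line : String) : String :=
  -- line.lstrip('\t') ported by hand as dropWhile (exact: drops exactly the leading tabs)
  let stripped := line.toList.dropWhile (fun c => c == '\t')
  -- '\t' * n
  String.ofList (List.replicate (line.toList.length - stripped.length) '\t')

-- ===== PRECONDITION & SPEC =====
def Spec_get_tabs_from_line (line : String) (out : String) : Prop := out = get_tabs_from_line_alt line
instance (line : String) (out : String) : Decidable (Spec_get_tabs_from_line line out) := by unfold Spec_get_tabs_from_line; infer_instance

-- ===== CLAIM (what is proved, stated in full; the proofs are below) =====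
def Claim_equal_get_tabs_from_line : Prop := ∀ (line : String), Dom_get_tabs_from_line line → Spec_get_tabs_from_line line (get_tabs_from_line line)

-- ===== LEMMAS AND PROOFS =====

theorem getTabsLoop_toList (l : List Char) (tabs : String) :
    (getTabsLoop l tabs).toList =
      tabs.toList ++ List.replicate (l.length - (l.dropWhile (fun c => c == '\t')).length) '\t' := by
  induction l generalizing tabs with
  | nil => simp [getTabsLoop]
  | cons c rest ih =>
    by_cases h : c = '\t'
    · subst h
      have hle : (rest.dropWhile (fun c => c == '\t')).length <= rest.length :=
        List.length_dropWhile_le _ _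
      have hn : rest.length + 1 - (rest.dropWhile (fun c => c == '\t')).length
          = (rest.length - (rest.dropWhile (fun c => c == '\t')).length) + 1 := by omega
      simp only [getTabsLoop, List.dropWhile, beq_self_eq_true, if_true, List.length_cons, hn]
      rw [ih]
      simp [List.replicate_succ]
    · have hc : (c == '\t') = false := by simp [h]
      simp [getTabsLoop, List.dropWhile, hc]

-- ===== VERDICT (by name: the statement is the Claim_ definition above) =====
theorem get_tabs_from_line_spec : Claim_equal_get_tabs_from_line := by
  intro line _
  unfold Spec_get_tabs_from_line get_tabs_from_line get_tabs_from_line_alt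
  have h := getTabsLoop_toList line.toList ""
  have h2 := congrArg String.ofList h
  simp only [String.ofList_toList] at h2
  rw [h2]
  simp [String.ofList]
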